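-- pv_equiv track=rewrite | github.com/varungaddalay-github/daily-engineering-workout | problems/2025_12_04.py | has_proximity_violation
-- ===== SOURCE A (Python) =====
-- def has_proximity_violation(s, keywords_a, keywords_b, window_size):
--     """
--     Given:
--     - s: message string
--     - keywords_a: set[str]
--     - keywords_b: set[str]
--     - window_size: integer (# words)
--
--     Return True if ANY window of size <= window_size contains:
--     - at least 1 word from keywords_a
--     - at least 1 word from keywords_b
--
--     Matching is case-insensitive and strips . , ! ? from word boundaries.
--     """
--     if window_size <= 0:
--         return False
--
--     # Normalize keyword sets to lowercase
--     A = {w.lower() for w in keywords_a}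
--     B = {w.lower() for w in keywords_b}
--
--     if not A or not B:
--         return False
--
--     # Normalize message -> list of cleaned words
--     words = [w.strip(".,!?").lower() for w in s.split() if w.strip(".,!?")]
--     n = len(words)
--     if n == 0:
--         return False
--
--     # Sliding window over words with counts of A/B hits
--     countA = 0
--     countB = 0
--     l = 0
--
--     for r in range(n):
--         w = words[r]
--         if w in A:
--             countA += 1
--         if w in B:
--             countB += 1
--
--         # Ensure window size <= window_size
--         while r - l + 1 > window_size:
--             left_w = words[l]
--             if left_w in A:
--                 countA -= 1
--             if left_w in B:
--                 countB -= 1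
--             l += 1
--
--         # Check condition in current window [l, r]
--         if countA > 0 and countB > 0:
--             return True
--
--     return False
-- ===== SOURCE B (Python) =====
-- def has_proximity_violation(s, keywords_a, keywords_b, window_size):
--     A = {w.lower() for w in keywords_a}
--     B = {w.lower() for w in keywords_b}
--     max_gap = window_size - 1
--     last_a = last_b = None
--     r = 0
--     for tok in s.split():
--         w = tok.strip(".,!?")
--         if not w:
--             continue
--         w = w.lower()
--         if w in A:
--             last_a = r
--         if w in B:
--             last_b = r
--         if last_a is not None and last_b is not None and abs(last_a - last_b) <= max_gap:
--             return True
--         r += 1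
--     return False
-- ===== Notes on version B (the rewrite author's own statement) =====
-- stated objective: simpler
-- what changed: Replaces the count-maintaining sliding window (hit counters, an inner shrink loop, a precomputed word list and three early-exit guards) by a single streaming pass over the tokens that tracks only the last index at which a word from each set was seen and returns True as soon as those two indices are within window_size-1.
import Mathlib
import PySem

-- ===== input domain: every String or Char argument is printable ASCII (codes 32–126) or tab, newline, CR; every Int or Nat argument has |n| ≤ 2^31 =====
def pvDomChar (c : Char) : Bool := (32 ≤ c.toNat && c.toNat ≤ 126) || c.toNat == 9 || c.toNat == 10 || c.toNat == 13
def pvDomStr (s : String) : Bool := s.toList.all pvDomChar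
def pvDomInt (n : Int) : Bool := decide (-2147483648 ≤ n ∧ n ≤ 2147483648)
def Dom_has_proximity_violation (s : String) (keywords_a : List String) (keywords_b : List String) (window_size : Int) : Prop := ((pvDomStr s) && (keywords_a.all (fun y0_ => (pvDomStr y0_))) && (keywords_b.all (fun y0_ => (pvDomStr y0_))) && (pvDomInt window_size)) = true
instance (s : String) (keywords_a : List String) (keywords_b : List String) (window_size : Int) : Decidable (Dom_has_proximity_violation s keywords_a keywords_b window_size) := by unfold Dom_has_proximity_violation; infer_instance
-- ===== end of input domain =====

-- B replaces A's counter-based sliding window (inner shrink loop, precomputed word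
-- list, early-exit guards) by one streaming pass tracking the last index seen from
-- each keyword set; objective: simpler.

-- ===== PORT A =====
-- words = [w.strip(".,!?").lower() for w in s.split() if w.strip(".,!?")]
def pvCleanA (s : String) : List String :=
  ((PySem.Str.split₀ s).filter
      (fun w => !(PySem.Str.stripChars w ".,!?" == ""))).map
    (fun w => PySem.Str.lower (PySem.Str.stripChars w ".,!?"))

-- the inner 'while r - l + 1 > window_size' shrink loop; 'l < r + 1' is a totality
-- guard only (in every reachable call with window_size ≥ 1 the Python guard already
-- implies it); words.getD l "" is exact since reachable calls have l < words.length
def pvShrink (words A B : List String) (w : Int) (r : Nat) (l : Nat) (cA cB : Int) :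
    Nat × Int × Int :=
  if h : (r : Int) - l + 1 > w ∧ l < r + 1 then
    pvShrink words A B w r (l + 1)
      (if PySem.Set.contains A (words.getD l "") then cA - 1 else cA)
      (if PySem.Set.contains B (words.getD l "") then cB - 1 else cB)
  else (l, cA, cB)
termination_by r + 1 - l
decreasing_by omega

-- the 'for r in range(n)' loop
def pvLoopA (words A B : List String) (w : Int) (r l : Nat) (cA cB : Int) : Bool :=
  if h : r < words.length then
    match pvShrink words A B w r l
        (if PySem.Set.contains A (words.getD r "") then cA + 1 else cA)
        (if PySem.Set.contains B (words.getD r "") then cB + 1 else cB) with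
    | (l', cA', cB') =>
      if cA' > 0 ∧ cB' > 0 then true
      else pvLoopA words A B w (r + 1) l' cA' cB'
  else false
termination_by words.length - r

def has_proximity_violation (s : String) (keywords_a : List String) (keywords_b : List String) (window_size : Int) : Bool :=
  if window_size ≤ 0 then false
  else
    let A := PySem.Set.ofList (keywords_a.map PySem.Str.lower)
    let B := PySem.Set.ofList (keywords_b.map PySem.Str.lower)
    if A.isEmpty || B.isEmpty then false
    else
      let words := pvCleanA s
      if words.length = 0 then false
      else pvLoopA words A B window_size 0 0 0 0

-- ===== PORT B =====
-- streaming pass: last index seen from A / from B, check |last_a - last_b| ≤ max_gap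
def pvLoopB (A B : List String) (maxGap : Int) :
    List String → Nat → Option Nat → Option Nat → Bool
  | [], _, _, _ => false
  | tok :: rest, r, lastA, lastB =>
    let w := PySem.Str.stripChars tok ".,!?"
    if w == "" then pvLoopB A B maxGap rest r lastA lastB
    else
      let w := PySem.Str.lower w
      let lastA := if PySem.Set.contains A w then some r else lastA
      let lastB := if PySem.Set.contains B w then some r else lastB
      match lastA, lastB with
      | some i, some j =>
        if |(i : Int) - (j : Int)| ≤ maxGap then true
        else pvLoopB A B maxGap rest (r + 1) (some i) (some j)
      | la, lb => pvLoopB A B maxGap rest (r + 1) la lb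

def has_proximity_violation_alt (s : String) (keywords_a : List String) (keywords_b : List String) (window_size : Int) : Bool :=
  let A := PySem.Set.ofList (keywords_a.map PySem.Str.lower)
  let B := PySem.Set.ofList (keywords_b.map PySem.Str.lower)
  pvLoopB A B (window_size - 1) (PySem.Str.split₀ s) 0 none none

-- ===== PRECONDITION & SPEC =====
def Spec_has_proximity_violation (s : String) (keywords_a : List String) (keywords_b : List String) (window_size : Int) (out : Bool) : Prop := out = has_proximity_violation_alt s keywords_a keywords_b window_size
instance (s : String) (keywords_a : List String) (keywords_b : List String) (window_size : Int) (out : Bool) : Decidable (Spec_has_proximity_violation s keywords_a keywords_b window_size out) := by unfold Spec_has_proximity_violation; infer_instance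

-- ===== CLAIM (what is proved, stated in full; the proofs are below) =====
def Claim_equal_has_proximity_violation : Prop := ∀ (s : String) (keywords_a : List String) (keywords_b : List String) (window_size : Int), Dom_has_proximity_violation s keywords_a keywords_b window_size → Spec_has_proximity_violation s keywords_a keywords_b window_size (has_proximity_violation s keywords_a keywords_b window_size)

-- ===== LEMMAS AND PROOFS =====

-- B's loop re-expressed over the cleaned word list (proof helper)
def pvClose (g : Int) : Option Nat → Option Nat → Bool
  | some i, some j => decide (|(i : Int) - (j : Int)| ≤ g)
  | _, _ => false

def pvLoopW (A B : List String) (g : Int) :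
    List String → Nat → Option Nat → Option Nat → Bool
  | [], _, _, _ => false
  | wd :: rest, r, la, lb =>
    let la' := if PySem.Set.contains A wd then some r else la
    let lb' := if PySem.Set.contains B wd then some r else lb
    if pvClose g la' lb' then true else pvLoopW A B g rest (r + 1) la' lb'

def pvCleanW (toks : List String) : List String :=
  (toks.filter (fun w => !(PySem.Str.stripChars w ".,!?" == ""))).map
    (fun w => PySem.Str.lower (PySem.Str.stripChars w ".,!?"))

lemma pvLoopB_eq_loopW (A B : List String) (g : Int) :
    ∀ (toks : List String) (r : Nat) (la lb : Option Nat),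
      pvLoopB A B g toks r la lb = pvLoopW A B g (pvCleanW toks) r la lb := by
  intro toks
  induction toks with
  | nil => intro r la lb; rfl
  | cons tok rest ih =>
    intro r la lb
    by_cases h : PySem.Str.stripChars tok ".,!?" = ""
    · simp [pvLoopB, pvCleanW, h, ih r la lb, pvCleanW]
    · have hf : (!(PySem.Str.stripChars tok ".,!?" == "")) = true := by simp [h]
      simp only [pvCleanW, List.filter_cons, hf, if_pos, List.map_cons]
      rw [pvLoopB, pvLoopW]
      simp only [beq_iff_eq, h, ite_false]
      set w := PySem.Str.lower (PySem.Str.stripChars tok ".,!?") with hw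
      set la' := if PySem.Set.contains A w then some r else la with hla'
      set lb' := if PySem.Set.contains B w then some r else lb with hlb'
      show (match la', lb' with
            | some i, some j =>
              if |(i : Int) - (j : Int)| ≤ g then true
              else pvLoopB A B g rest (r + 1) (some i) (some j)
            | la, lb => pvLoopB A B g rest (r + 1) la lb) = _
      rcases ha : la' with _ | i <;> rcases hb : lb' with _ | j <;>
        simp only [pvClose] <;> first
          | (rw [ih]; simp [pvCleanW])
          | (by_cases hc : |(i : Int) - (j : Int)| ≤ g
             · simp [hc]
             · simp [hc, ih, pvCleanW])

-- invariant for the last-seen trackers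
def pvInv (S words : List String) (r : Nat) (o : Option Nat) : Prop :=
  (∀ i, o = some i → i < r ∧ PySem.Set.contains S (words.getD i "") = true) ∧
  (∀ k, k < r → PySem.Set.contains S (words.getD k "") = true →
    ∃ i, o = some i ∧ k ≤ i)

lemma pvInv_step (S words : List String) (r : Nat) (o : Option Nat)
    (h : pvInv S words r o) :
    pvInv S words (r + 1)
      (if PySem.Set.contains S (words.getD r "") then some r else o) := by
  obtain ⟨h1, h2⟩ := h
  by_cases hc : PySem.Set.contains S (words.getD r "") = true
  · refine ⟨?_, ?_⟩ <;> simp only [hc, if_pos]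
    · rintro i hi; cases hi; exact ⟨Nat.lt_succ_self r, hc⟩
    · intro k hk _; exact ⟨r, rfl, Nat.lt_succ_iff.mp hk⟩
  · rw [if_neg hc]
    refine ⟨fun i hi => ?_, fun k hk hS => ?_⟩
    · obtain ⟨hlt, hm⟩ := h1 i hi; exact ⟨Nat.lt_succ_of_lt hlt, hm⟩
    · rcases Nat.lt_succ_iff_lt_or_eq.mp hk with hk' | rfl
      · exact h2 k hk' hS
      · exact absurd hS hc

lemma pvLoopW_iff (A B : List String) (g : Int) (words : List String) :
    ∀ (suf : List String) (r : Nat) (la lb : Option Nat),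
      words.drop r = suf →
      pvInv A words r la → pvInv B words r lb →
      pvClose g la lb = false →
      (pvLoopW A B g suf r la lb = true ↔
        ∃ i j, i < words.length ∧ j < words.length ∧
          PySem.Set.contains A (words.getD i "") = true ∧
          PySem.Set.contains B (words.getD j "") = true ∧
          |(i : Int) - (j : Int)| ≤ g ∧ (r ≤ i ∨ r ≤ j)) := by
  intro suf
  induction suf with
  | nil =>
    intro r la lb hdrop _ _ _
    have hr : words.length ≤ r := by
      have := congrArg List.length hdrop; simp at this; omega
    simp only [pvLoopW, Bool.false_eq_true, false_iff]
    rintro ⟨i, j, hi, hj, _, _, _, hij | hij⟩ <;> omega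
  | cons wd rest ih =>
    intro r la lb hdrop hA hB hclose
    have hr : r < words.length := by
      have := congrArg List.length hdrop; simp at this; omega
    have hwd : words.getD r "" = wd := by
      have h0 : (words.drop r).getD 0 "" = wd := by rw [hdrop]; rfl
      rw [List.getD_eq_getElem?_getD, List.getElem?_drop] at h0
      simpa [List.getD_eq_getElem?_getD] using h0
    have hrest : words.drop (r + 1) = rest := by
      have h0 : (words.drop r).tail = rest := by rw [hdrop]; rfl
      rwa [List.tail_drop] at h0
    rw [pvLoopW]
    set la' := if PySem.Set.contains A wd then some r else la with hla'
    set lb' := if PySem.Set.contains B wd then some r else lb with hlb'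
    have hA' : pvInv A words (r + 1) la' := by
      rw [hla', ← hwd]; exact pvInv_step A words r la hA
    have hB' : pvInv B words (r + 1) lb' := by
      rw [hlb', ← hwd]; exact pvInv_step B words r lb hB
    by_cases hc : pvClose g la' lb' = true
    · simp only [hc, if_pos, true_iff]
      rcases ha : la' with _ | i
      · rw [ha] at hc; simp [pvClose] at hc
      rcases hb : lb' with _ | j
      · rw [ha, hb] at hc; simp [pvClose] at hc
      rw [ha, hb] at hc
      have hg : |(i : Int) - (j : Int)| ≤ g := by simpa [pvClose] using hc
      obtain ⟨hi, hiA⟩ := hA'.1 i ha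
      obtain ⟨hj, hjB⟩ := hB'.1 j hb
      refine ⟨i, j, by omega, by omega, hiA, hjB, hg, ?_⟩
      by_contra hboth
      push_neg at hboth
      have hla : la = some i := by
        by_cases hcA : PySem.Set.contains A wd = true
        · rw [hla', if_pos hcA] at ha; cases ha; omega
        · rw [hla', if_neg hcA] at ha; exact ha
      have hlb : lb = some j := by
        by_cases hcB : PySem.Set.contains B wd = true
        · rw [hlb', if_pos hcB] at hb; cases hb; omega
        · rw [hlb', if_neg hcB] at hb; exact hb
      rw [hla, hlb] at hclose
      simp [pvClose, hg] at hclose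
    · have hcf : pvClose g la' lb' = false := by
        cases hx : pvClose g la' lb'
        · rfl
        · exact absurd hx hc
      simp only [hcf, Bool.false_eq_true, if_neg, not_false_iff, ite_false]
      rw [ih (r + 1) la' lb' hrest hA' hB' hcf]
      constructor
      · rintro ⟨i, j, hi, hj, hiA, hjB, hg, hor⟩
        exact ⟨i, j, hi, hj, hiA, hjB, hg, by omega⟩
      · rintro ⟨i, j, hi, hj, hiA, hjB, hg, hor⟩
        refine ⟨i, j, hi, hj, hiA, hjB, hg, ?_⟩
        by_contra hnot
        push_neg at hnot
        obtain ⟨i', hi'eq, hi'ge⟩ := hA'.2 i (by omega) hiA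
        obtain ⟨j', hj'eq, hj'ge⟩ := hB'.2 j (by omega) hjB
        obtain ⟨hi'lt, _⟩ := hA'.1 i' hi'eq
        obtain ⟨hj'lt, _⟩ := hB'.1 j' hj'eq
        have hclose' : |(i' : Int) - (j' : Int)| ≤ g := by
          have hmax : i = r ∨ j = r := by omega
          have hg2 := abs_le.mp hg
          rw [abs_le]
          rcases hmax with rfl | rfl <;> constructor <;> omega
        rw [hi'eq, hj'eq] at hcf
        simp [pvClose, hclose'] at hcf

-- B's top-level result, characterised
lemma pvAlt_iff (s : String) (ka kb : List String) (w : Int) :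
    (has_proximity_violation_alt s ka kb w = true ↔
      ∃ i j, i < (pvCleanA s).length ∧ j < (pvCleanA s).length ∧
        PySem.Set.contains (PySem.Set.ofList (ka.map PySem.Str.lower)) ((pvCleanA s).getD i "") = true ∧
        PySem.Set.contains (PySem.Set.ofList (kb.map PySem.Str.lower)) ((pvCleanA s).getD j "") = true ∧
        |(i : Int) - (j : Int)| ≤ w - 1) := by
  rw [has_proximity_violation_alt]
  rw [pvLoopB_eq_loopW]
  have hclean : pvCleanW (PySem.Str.split₀ s) = pvCleanA s := rfl
  rw [hclean]
  rw [pvLoopW_iff _ _ _ (pvCleanA s) (pvCleanA s) 0 none none (by simp)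
    ⟨by simp, by omega⟩ ⟨by simp, by omega⟩ rfl]
  constructor
  · rintro ⟨i, j, h1, h2, h3, h4, h5, _⟩; exact ⟨i, j, h1, h2, h3, h4, h5⟩
  · rintro ⟨i, j, h1, h2, h3, h4, h5⟩; exact ⟨i, j, h1, h2, h3, h4, h5, by omega⟩

-- ===== A-side =====

-- number of window hits, as Python's counters hold it
def pvCnt (S words : List String) (l len : Nat) : Nat :=
  (List.range' l len).countP (fun i => PySem.Set.contains S (words.getD i ""))

lemma pvShrink_spec (words A B : List String) (w : Int) (hw : 1 ≤ w) (r : Nat) :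
    ∀ (k l : Nat), l + k = r + 1 →
      pvShrink words A B w r l (pvCnt A words l (r + 1 - l) : Int)
          (pvCnt B words l (r + 1 - l) : Int)
        = (max l ((r : Int) + 1 - w).toNat,
           (pvCnt A words (max l ((r : Int) + 1 - w).toNat)
             (r + 1 - max l ((r : Int) + 1 - w).toNat) : Int),
           (pvCnt B words (max l ((r : Int) + 1 - w).toNat)
             (r + 1 - max l ((r : Int) + 1 - w).toNat) : Int)) := by
  intro k
  induction k with
  | zero =>
    intro l hl
    rw [pvShrink]
    have hguard : ¬((r : Int) - l + 1 > w ∧ l < r + 1) := by omega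
    rw [dif_neg hguard]
    have hm : max l ((r : Int) + 1 - w).toNat = l := by omega
    rw [hm]
  | succ k ih =>
    intro l hl
    rw [pvShrink]
    by_cases hg : (r : Int) - l + 1 > w
    · have hlt : l < r + 1 := by omega
      rw [dif_pos ⟨hg, hlt⟩]
      have hsplit : ∀ S : List String,
          pvCnt S words l (r + 1 - l)
            = (if PySem.Set.contains S (words.getD l "") then 1 else 0)
              + pvCnt S words (l + 1) (r + 1 - (l + 1)) := by
        intro S
        have hlen : r + 1 - l = (r - l) + 1 := by omega
        rw [pvCnt, hlen, List.range'_succ, List.countP_cons]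
        have : r + 1 - (l + 1) = r - l := by omega
        rw [pvCnt, this]
        by_cases hc : PySem.Set.contains S (words.getD l "") = true <;>
          simp [hc] <;> omega
      have hA : ((if PySem.Set.contains A (words.getD l "") then
            ((pvCnt A words l (r + 1 - l) : Nat) : Int) - 1
          else (pvCnt A words l (r + 1 - l) : Int)))
          = (pvCnt A words (l + 1) (r + 1 - (l + 1)) : Int) := by
        rw [hsplit A]
        by_cases hc : PySem.Set.contains A (words.getD l "") = true
        · rw [if_pos hc, if_pos hc]; push_cast; ring
        · rw [if_neg hc, if_neg hc]; push_cast; ring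
      have hB : ((if PySem.Set.contains B (words.getD l "") then
            ((pvCnt B words l (r + 1 - l) : Nat) : Int) - 1
          else (pvCnt B words l (r + 1 - l) : Int)))
          = (pvCnt B words (l + 1) (r + 1 - (l + 1)) : Int) := by
        rw [hsplit B]
        by_cases hc : PySem.Set.contains B (words.getD l "") = true
        · rw [if_pos hc, if_pos hc]; push_cast; ring
        · rw [if_neg hc, if_neg hc]; push_cast; ring
      rw [hA, hB, ih (l + 1) (by omega)]
      have hm : max (l + 1) ((r : Int) + 1 - w).toNat
          = max l ((r : Int) + 1 - w).toNat := by omega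
      rw [hm]
    · rw [dif_neg (by tauto)]
      have hm : max l ((r : Int) + 1 - w).toNat = l := by omega
      rw [hm]

lemma pvCnt_pos {S words : List String} {l len : Nat} :
    0 < pvCnt S words l len ↔
      ∃ i, l ≤ i ∧ i < l + len ∧ PySem.Set.contains S (words.getD i "") = true := by
  rw [pvCnt, List.countP_pos_iff]
  constructor
  · rintro ⟨i, hmem, hp⟩
    rw [List.mem_range'] at hmem
    obtain ⟨m, hm, hi⟩ := hmem
    exact ⟨i, by omega, by omega, by simpa using hp⟩
  · rintro ⟨i, h1, h2, h3⟩
    refine ⟨i, List.mem_range'.mpr ⟨i - l, by omega, by omega⟩, by simpa using h3⟩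

lemma pvLoopA_iff (words A B : List String) (w : Int) (hw : 1 ≤ w) :
    ∀ (k r : Nat), r + k = words.length →
      ∀ (l : Nat), l = ((r : Int) - w).toNat →
      ¬(0 < pvCnt A words l (r - l) ∧ 0 < pvCnt B words l (r - l)) →
      (pvLoopA words A B w r l (pvCnt A words l (r - l) : Int)
          (pvCnt B words l (r - l) : Int) = true ↔
        ∃ i j, i < words.length ∧ j < words.length ∧
          PySem.Set.contains A (words.getD i "") = true ∧
          PySem.Set.contains B (words.getD j "") = true ∧
          |(i : Int) - (j : Int)| ≤ w - 1 ∧ (r ≤ i ∨ r ≤ j)) := by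
  intro k
  induction k with
  | zero =>
    intro r hr l hleq _
    rw [pvLoopA, dif_neg (by omega)]
    simp only [Bool.false_eq_true, false_iff]
    rintro ⟨i, j, hi, hj, _, _, _, hor⟩
    omega
  | succ k ih =>
    intro r hr l hleq hprev
    have hrn : r < words.length := by omega
    have hlr : l ≤ r := by omega
    rw [pvLoopA, dif_pos hrn]
    simp only
    -- updated counters count over [l, r]
    have hupd : ∀ S : List String,
        (if PySem.Set.contains S (words.getD r "") then (pvCnt S words l (r - l) : Int) + 1
         else (pvCnt S words l (r - l) : Int))
          = (pvCnt S words l (r + 1 - l) : Int) := by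
      intro S
      have hsplit : pvCnt S words l (r + 1 - l)
          = pvCnt S words l (r - l)
            + (if PySem.Set.contains S (words.getD r "") then 1 else 0) := by
        have h1 : r + 1 - l = (r - l) + 1 := by omega
        rw [pvCnt, h1, List.range'_concat, List.countP_append, pvCnt]
        have h2 : l + 1 * (r - l) = r := by omega
        rw [h2, List.countP_cons, List.countP_nil]
        by_cases hc : PySem.Set.contains S (words.getD r "") = true
        · rw [if_pos hc]
        · rw [if_neg hc]
      rw [hsplit]
      by_cases hc : PySem.Set.contains S (words.getD r "") = true
      · rw [if_pos hc, if_pos hc]; push_cast; ring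
      · rw [if_neg hc, if_neg hc]; push_cast; ring
    rw [hupd A, hupd B, pvShrink_spec words A B w hw r (r + 1 - l) l (by omega)]
    set L := max l ((r : Int) + 1 - w).toNat with hL
    have hLval : L = ((r : Int) + 1 - w).toNat ∨ L = l := by omega
    have hLeq : L = (((r : Nat) + 1 : Int) - w).toNat := by
      push_cast; omega
    have hlL : l ≤ L := by omega
    have hLr : L ≤ r := by omega
    by_cases hchk : 0 < pvCnt A words L (r + 1 - L) ∧ 0 < pvCnt B words L (r + 1 - L)
    · rw [if_pos (by exact ⟨by simpa using hchk.1, by simpa using hchk.2⟩)]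
      simp only [true_iff]
      obtain ⟨i, hil, hir, hiA⟩ := pvCnt_pos.mp hchk.1
      obtain ⟨j, hjl, hjr, hjB⟩ := pvCnt_pos.mp hchk.2
      refine ⟨i, j, by omega, by omega, hiA, hjB, ?_, ?_⟩
      · rw [abs_le]
        have hLw : ((r : Int) + 1 - w) ≤ L := by omega
        omega
      · by_contra hboth
        push_neg at hboth
        exact hprev ⟨pvCnt_pos.mpr ⟨i, by omega, by omega, hiA⟩,
          pvCnt_pos.mpr ⟨j, by omega, by omega, hjB⟩⟩
    · rw [if_neg (by
        rintro ⟨h1, h2⟩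
        exact hchk ⟨by simpa using h1, by simpa using h2⟩)]
      have harg : r + 1 - L = (r + 1) - L := rfl
      rw [ih (r + 1) (by omega) L hLeq (by rwa [harg])]
      constructor
      · rintro ⟨i, j, hi, hj, hiA, hjB, hg, hor⟩
        exact ⟨i, j, hi, hj, hiA, hjB, hg, by omega⟩
      · rintro ⟨i, j, hi, hj, hiA, hjB, hg, hor⟩
        refine ⟨i, j, hi, hj, hiA, hjB, hg, ?_⟩
        by_contra hnot
        push_neg at hnot
        -- then max(i,j) = r and both lie in [L, r]: the check would have fired
        have hmax : i = r ∨ j = r := by omega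
        have hg2 := abs_le.mp hg
        have hiL : L ≤ i := by
          have : ((r : Int) + 1 - w) ≤ i := by
            rcases hmax with rfl | rfl <;> omega
          omega
        have hjL : L ≤ j := by
          have : ((r : Int) + 1 - w) ≤ j := by
            rcases hmax with rfl | rfl <;> omega
          omega
        exact hchk ⟨pvCnt_pos.mpr ⟨i, hiL, by omega, hiA⟩,
          pvCnt_pos.mpr ⟨j, hjL, by omega, hjB⟩⟩

-- A's top-level result, characterised (for window_size ≥ 1, nonempty sets and words)
lemma pvA_iff (s : String) (ka kb : List String) (w : Int) (hw : 1 ≤ w)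
    (hka : PySem.Set.ofList (ka.map PySem.Str.lower) ≠ [])
    (hkb : PySem.Set.ofList (kb.map PySem.Str.lower) ≠ [])
    (hn : (pvCleanA s).length ≠ 0) :
    (has_proximity_violation s ka kb w = true ↔
      ∃ i j, i < (pvCleanA s).length ∧ j < (pvCleanA s).length ∧
        PySem.Set.contains (PySem.Set.ofList (ka.map PySem.Str.lower)) ((pvCleanA s).getD i "") = true ∧
        PySem.Set.contains (PySem.Set.ofList (kb.map PySem.Str.lower)) ((pvCleanA s).getD j "") = true ∧
        |(i : Int) - (j : Int)| ≤ w - 1) := by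
  rw [has_proximity_violation]
  rw [if_neg (by omega)]
  simp only [List.isEmpty_iff, hka, hkb, Bool.or_self, if_neg, or_self,
    decide_eq_true_eq]
  rw [if_neg (by simp [hka, hkb]), if_neg hn]
  have hloop := pvLoopA_iff (pvCleanA s) (PySem.Set.ofList (ka.map PySem.Str.lower))
    (PySem.Set.ofList (kb.map PySem.Str.lower)) w hw (pvCleanA s).length 0 (by omega)
    0 (by omega) (by simp [pvCnt])
  simp only [pvCnt, Nat.sub_zero, List.range'_zero, List.countP_nil,
    Nat.cast_zero] at hloop
  rw [hloop]
  constructor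
  · rintro ⟨i, j, h1, h2, h3, h4, h5, _⟩; exact ⟨i, j, h1, h2, h3, h4, h5⟩
  · rintro ⟨i, j, h1, h2, h3, h4, h5⟩; exact ⟨i, j, h1, h2, h3, h4, h5, by omega⟩

lemma pvContains_nil (x : String) : PySem.Set.contains ([] : List String) x = false := by
  simp [PySem.Set.contains]

-- ===== VERDICT (by name: the statement is the Claim_ definition above) =====
theorem has_proximity_violation_spec : Claim_equal_has_proximity_violation := by
  intro s ka kb w _
  unfold Spec_has_proximity_violation
  by_cases hw : w ≤ 0
  · -- A returns False by its guard; B never finds a pair within gap w-1 < 0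
    rw [has_proximity_violation, if_pos hw]
    have halt : has_proximity_violation_alt s ka kb w = false := by
      apply Bool.eq_false_iff.mpr
      intro h
      obtain ⟨i, j, _, _, _, _, hg⟩ := (pvAlt_iff s ka kb w).mp h
      have hg2 := abs_le.mp hg
      omega
    rw [halt]
  · push_neg at hw
    have hw1 : 1 ≤ w := hw
    by_cases hka : PySem.Set.ofList (ka.map PySem.Str.lower) = []
    · rw [has_proximity_violation, if_neg (by omega)]
      simp only [hka, List.isEmpty_nil, Bool.true_or, if_pos]
      have halt : has_proximity_violation_alt s ka kb w = false := by
        apply Bool.eq_false_iff.mpr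
        intro h
        obtain ⟨i, j, _, _, hiA, _, _⟩ := (pvAlt_iff s ka kb w).mp h
        rw [hka, pvContains_nil] at hiA
        exact Bool.false_ne_true hiA
      rw [halt]
    by_cases hkb : PySem.Set.ofList (kb.map PySem.Str.lower) = []
    · rw [has_proximity_violation, if_neg (by omega)]
      simp only [hkb, List.isEmpty_nil, Bool.or_true, if_pos]
      have halt : has_proximity_violation_alt s ka kb w = false := by
        apply Bool.eq_false_iff.mpr
        intro h
        obtain ⟨i, j, _, _, _, hjB, _⟩ := (pvAlt_iff s ka kb w).mp h
        rw [hkb, pvContains_nil] at hjB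
        exact Bool.false_ne_true hjB
      rw [halt]
    by_cases hn : (pvCleanA s).length = 0
    · rw [has_proximity_violation, if_neg (by omega)]
      rw [if_neg (by simp [hka, hkb]), if_pos hn]
      have halt : has_proximity_violation_alt s ka kb w = false := by
        apply Bool.eq_false_iff.mpr
        intro h
        obtain ⟨i, j, hi, _, _, _, _⟩ := (pvAlt_iff s ka kb w).mp h
        omega
      rw [halt]
    · exact Bool.eq_iff_iff.mpr
        ((pvA_iff s ka kb w hw1 hka hkb hn).trans (pvAlt_iff s ka kb w).symm)
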